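-- pv_equiv track=rewrite | github.com/ParkerCase/KiHealth | pubmed-literature-mining/scripts/fix_probast_system.py | is_usable_with_justification
-- ===== SOURCE A (Python) =====
-- from typing import Dict, List
--
-- def is_usable_with_justification(assessment: Dict) -> bool:
--     """
--     Determine if article is usable with justification
--
--     More lenient criteria:
--     - 3 Low + 1 Moderate = Usable (with justification)
--     - 2 Low + 2 Moderate = Usable (with strong justification)
--     - All Low = Usable (no justification needed)
--     """
--     if not assessment:
--         return False
--
--     domain_1 = assessment.get("domain_1_participants", "").lower()
--     domain_2 = assessment.get("domain_2_predictors", "").lower()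
--     domain_3 = assessment.get("domain_3_outcome", "").lower()
--     domain_4 = assessment.get("domain_4_analysis", "").lower()
--
--     domains = [domain_1, domain_2, domain_3, domain_4]
--     low_count = sum(1 for d in domains if d == "low")
--     moderate_count = sum(1 for d in domains if d == "moderate")
--     high_count = sum(1 for d in domains if d == "high")
--     unclear_count = sum(1 for d in domains if d == "unclear" or not d)
--
--     # All Low = Usable
--     if low_count == 4:
--         return True
--
--     # 3 Low + 1 Moderate = Usable (with justification)
--     if low_count == 3 and moderate_count == 1:
--         return True
--
--     # 2 Low + 2 Moderate = Usable (with strong justification)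
--     if low_count == 2 and moderate_count == 2:
--         return True
--
--     # No High Risk domains
--     if high_count == 0:
--         # 1 Low + 3 Moderate = Borderline, but usable with justification
--         if low_count >= 1 and moderate_count >= 3:
--             return True
--
--     return False
-- ===== SOURCE B (Python) =====
-- def is_usable_with_justification(assessment):
--     """Usable iff every risk domain is low/moderate and at least one is low."""
--     if not assessment:
--         return False
--     domains = [assessment.get(k, "").lower() for k in (
--         "domain_1_participants",
--         "domain_2_predictors",
--         "domain_3_outcome",
--         "domain_4_analysis",
--     )]
--     return set(domains) <= {"low", "moderate"} and "low" in domains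
-- ===== Notes on version B (the rewrite author's own statement) =====
-- stated objective: simpler
-- what changed: Replaces A's four integer tallies (low/moderate/high/unclear) and the multi-branch count cascade with a single set-subset test: usable iff every domain value is in {low, moderate} and at least one is low.
import Mathlib
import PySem

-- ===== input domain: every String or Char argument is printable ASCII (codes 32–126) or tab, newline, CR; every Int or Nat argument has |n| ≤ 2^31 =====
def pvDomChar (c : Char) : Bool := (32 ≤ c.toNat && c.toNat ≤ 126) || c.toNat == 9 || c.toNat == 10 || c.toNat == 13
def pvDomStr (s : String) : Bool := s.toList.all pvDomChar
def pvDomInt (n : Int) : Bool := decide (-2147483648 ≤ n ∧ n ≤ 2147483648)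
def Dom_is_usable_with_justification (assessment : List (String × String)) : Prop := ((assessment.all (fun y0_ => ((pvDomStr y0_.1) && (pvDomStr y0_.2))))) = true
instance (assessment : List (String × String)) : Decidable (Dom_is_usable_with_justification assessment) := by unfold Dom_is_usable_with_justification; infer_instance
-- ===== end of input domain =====

-- B replaces A's four tallies and branch cascade by one subset test: usable iff
-- every domain is low/moderate and at least one is low (objective: simpler).

-- ===== PORT A =====
def is_usable_with_justification (assessment : List (String × String)) : Bool :=
  if assessment.isEmpty then false
  else
    let d := PySem.Dict.mk assessment
    let domain_1 := PySem.Str.lower (d.getD "domain_1_participants" "")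
    let domain_2 := PySem.Str.lower (d.getD "domain_2_predictors" "")
    let domain_3 := PySem.Str.lower (d.getD "domain_3_outcome" "")
    let domain_4 := PySem.Str.lower (d.getD "domain_4_analysis" "")
    let domains := [domain_1, domain_2, domain_3, domain_4]
    let low_count := domains.countP (fun x => x == "low")
    let moderate_count := domains.countP (fun x => x == "moderate")
    let high_count := domains.countP (fun x => x == "high")
    let _unclear_count := domains.countP (fun x => x == "unclear" || x == "")
    if low_count == 4 then true
    else if low_count == 3 && moderate_count == 1 then true
    else if low_count == 2 && moderate_count == 2 then true
    else if high_count == 0 then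
      if low_count ≥ 1 && moderate_count ≥ 3 then true else false
    else false

-- ===== PORT B =====
def is_usable_with_justification_alt (assessment : List (String × String)) : Bool :=
  if assessment.isEmpty then false
  else
    let d := PySem.Dict.mk assessment
    let domains := ["domain_1_participants", "domain_2_predictors",
                    "domain_3_outcome", "domain_4_analysis"].map
      (fun k => PySem.Str.lower (d.getD k ""))
    PySem.Set.issubset (PySem.Set.ofList domains) (PySem.Set.ofList ["low", "moderate"])
      && domains.contains "low"

-- ===== PRECONDITION & SPEC =====
def Spec_is_usable_with_justification (assessment : List (String × String)) (out : Bool) : Prop := out = is_usable_with_justification_alt assessment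
instance (assessment : List (String × String)) (out : Bool) : Decidable (Spec_is_usable_with_justification assessment out) := by unfold Spec_is_usable_with_justification; infer_instance

-- ===== CLAIM (what is proved, stated in full; the proofs are below) =====
def Claim_equal_is_usable_with_justification : Prop := ∀ (assessment : List (String × String)), Dom_is_usable_with_justification assessment → Spec_is_usable_with_justification assessment (is_usable_with_justification assessment)

-- ===== LEMMAS AND PROOFS =====

-- The whole decision as a function of the four (lowered) domain strings.
theorem core (d1 d2 d3 d4 : String) :
    (if List.countP (fun x => x == "low") [d1, d2, d3, d4] == 4 then true
     else if List.countP (fun x => x == "low") [d1, d2, d3, d4] == 3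
             && List.countP (fun x => x == "moderate") [d1, d2, d3, d4] == 1 then true
     else if List.countP (fun x => x == "low") [d1, d2, d3, d4] == 2
             && List.countP (fun x => x == "moderate") [d1, d2, d3, d4] == 2 then true
     else if List.countP (fun x => x == "high") [d1, d2, d3, d4] == 0 then
       if List.countP (fun x => x == "low") [d1, d2, d3, d4] ≥ 1
          && List.countP (fun x => x == "moderate") [d1, d2, d3, d4] ≥ 3 then true else false
     else false)
    = (PySem.Set.issubset (PySem.Set.ofList [d1, d2, d3, d4])
         (PySem.Set.ofList ["low", "moderate"])
       && [d1, d2, d3, d4].contains "low") := by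
  rw [Bool.eq_iff_iff]
  simp only [PySem.Set.issubset_iff, PySem.Set.mem_ofList, Bool.and_eq_true,
    List.contains_eq_mem, List.mem_cons, List.not_mem_nil,
    decide_eq_true_eq, List.countP_cons, List.countP_nil, beq_iff_eq]
  by_cases h1 : d1 = "low" <;> by_cases h2 : d2 = "low" <;>
    by_cases h3 : d3 = "low" <;> by_cases h4 : d4 = "low" <;>
    by_cases m1 : d1 = "moderate" <;> by_cases m2 : d2 = "moderate" <;>
    by_cases m3 : d3 = "moderate" <;> by_cases m4 : d4 = "moderate" <;>
    simp_all

-- ===== VERDICT (by name: the statement is the Claim_ definition above) =====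
theorem is_usable_with_justification_spec : Claim_equal_is_usable_with_justification := by
  intro assessment _
  unfold Spec_is_usable_with_justification is_usable_with_justification is_usable_with_justification_alt
  by_cases h : assessment.isEmpty
  · simp [h]
  · simp only [h, List.map, Bool.false_eq_true, if_false]
    generalize PySem.Str.lower ((PySem.Dict.mk assessment).getD "domain_1_participants" "") = d1
    generalize PySem.Str.lower ((PySem.Dict.mk assessment).getD "domain_2_predictors" "") = d2
    generalize PySem.Str.lower ((PySem.Dict.mk assessment).getD "domain_3_outcome" "") = d3
    generalize PySem.Str.lower ((PySem.Dict.mk assessment).getD "domain_4_analysis" "") = d4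
    exact core d1 d2 d3 d4
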